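-- pv_equiv track=rewrite | github.com/rsscml/sc_ppt_summarizer | sid_llm_parser.py | _build_text_table
-- ===== SOURCE A (Python) =====
-- def _build_text_table(headers: list[str], rows: list[list[str]]) -> str:
--     """Render headers + rows as a compact pipe-delimited table with row labels."""
--     MAX_PAD_W = 80
--     ROW_NUM_W = 4
--
--     col_widths = [min(max(len(h), 4), MAX_PAD_W) for h in headers]
--     for row in rows:
--         for i, cell in enumerate(row[:len(headers)]):
--             if i < len(col_widths):
--                 col_widths[i] = min(max(col_widths[i], len(cell)), MAX_PAD_W)
--
--     def fmt(cells: list[str], row_label: str = "") -> str: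
--         padded = []
--         if row_label is not None:
--             padded.append(row_label.ljust(ROW_NUM_W))
--         for i, h in enumerate(headers):
--             val = cells[i] if i < len(cells) else ""
--             padded.append(val.ljust(col_widths[i]))
--         return "| " + " | ".join(padded) + " |"
--
--     hdr_line = fmt(headers, row_label="#")
--     sep_widths = [ROW_NUM_W] + col_widths
--     sep = "|-" + "-|-".join("-" * w for w in sep_widths) + "-|"
--     data_lines = [fmt(row, row_label=f"R{i+1:03d}") for i, row in enumerate(rows)]
--     return "\n".join([hdr_line, sep] + data_lines)
-- ===== SOURCE B (Python) =====
-- def _build_text_table(headers: list[str], rows: list[list[str]]) -> str: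
--     """Render as a pipe table built column-wise: materialize each column
--     (header cell, dash segment, data cells) fully padded, then transpose
--     the padded columns with zip(*...) and glue each transposed line."""
--     MAX_PAD_W = 80
--     ROW_NUM_W = 4
--     label_col = ["#"] + [f"R{i+1:03d}" for i in range(len(rows))]
--     data_cols = [[h] + [(r[j] if j < len(r) else "") for r in rows]
--                  for j, h in enumerate(headers)]
--     widths = [ROW_NUM_W] + [min(max(ROW_NUM_W, max(map(len, col))), MAX_PAD_W)
--                             for col in data_cols]
--     padded = [[col[0].ljust(w), "-" * w] + [c.ljust(w) for c in col[1:]]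
--               for col, w in zip([label_col] + data_cols, widths)]
--     def glue(parts, fill):
--         return "|" + fill + (fill + "|" + fill).join(parts) + fill + "|"
--     return "\n".join(glue(line, "-" if k == 1 else " ")
--                      for k, line in enumerate(zip(*padded)))
-- ===== Notes on version B (the rewrite author's own statement) =====
-- stated objective: alternative
-- what changed: B builds the table column-wise: it materializes each column (header cell, dash separator segment, data cells) as a fully padded list of strings, computes each width from that materialized column, then transposes the padded columns with zip(*...) and glues every transposed line with a fill-parameterized joiner, instead of A's row-major width fold plus a per-row fmt() renderer.
import Mathlib
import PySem

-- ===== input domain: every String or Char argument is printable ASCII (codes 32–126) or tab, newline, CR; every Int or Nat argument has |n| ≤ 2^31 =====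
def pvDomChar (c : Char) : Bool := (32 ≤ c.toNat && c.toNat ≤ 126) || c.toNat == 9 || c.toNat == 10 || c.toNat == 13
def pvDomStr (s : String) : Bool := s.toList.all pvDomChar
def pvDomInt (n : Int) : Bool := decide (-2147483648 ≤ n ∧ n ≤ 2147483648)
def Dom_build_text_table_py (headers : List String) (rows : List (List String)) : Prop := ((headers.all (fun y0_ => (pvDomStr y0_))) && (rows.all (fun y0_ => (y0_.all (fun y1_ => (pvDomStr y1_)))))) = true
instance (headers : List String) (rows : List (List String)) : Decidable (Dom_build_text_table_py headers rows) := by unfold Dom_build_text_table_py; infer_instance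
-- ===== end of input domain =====

-- B builds the table column-wise (each padded column materialized, widths per column,
-- then a zip(*...) transpose and a fill-parameterized line gluer) instead of A's
-- row-major width fold plus per-row fmt(); objective: alternative decomposition.

-- shared ports of Python str primitives used by both sides
-- s.ljust(w) with spaces (exact: pads max(w - len(s), 0) spaces)
def pvLjust (s : String) (w : Int) : String :=
  String.ofList (s.toList ++ List.replicate (w - (PySem.Str.len s)).toNat ' ')
-- f"R{m:03d}" for the row label; exact for every int m (sign stays in front, as in format)
def pvLabel (m : Int) : String :=
  "R" ++ String.ofList (PySem.Chars.zfill (PySem.Int.toChars m) 3)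

-- ===== PORT A =====
-- the body of A's inner loop: col_widths[i] = min(max(col_widths[i], len(cell)), 80), guarded by i < len(col_widths)
def pvStepCell (ws : List Int) (ic : Int × String) : List Int :=
  if ic.1 < PySem.List.len ws then
    PySem.List.pySetD ws ic.1 (min (max (PySem.List.pyGetD ws ic.1 0) (PySem.Str.len ic.2)) 80)
  else ws

-- one iteration of A's outer loop: for i, cell in enumerate(row[:len(headers)]): …
def pvStepRow (nh : Int) (ws : List Int) (row : List String) : List Int :=
  (PySem.List.enumerate (PySem.List.slice row none (some nh))).foldl pvStepCell ws

-- A's nested fmt helper (row_label is always a str here, so the 'is not None' branch is taken)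
def pvFmtA (headers : List String) (colWidths : List Int) (cells : List String) (rowLabel : String) : String :=
  let padded : List String := [pvLjust rowLabel 4]
  let padded := (PySem.List.enumerate headers).foldl
    (fun acc ih =>
      acc ++ [pvLjust (if ih.1 < PySem.List.len cells then PySem.List.pyGetD cells ih.1 "" else "")
                      (PySem.List.pyGetD colWidths ih.1 0)]) padded
  "| " ++ PySem.Str.join " | " padded ++ " |"

def build_text_table_py (headers : List String) (rows : List (List String)) : String :=
  let colWidths : List Int :=
    rows.foldl (pvStepRow (PySem.List.len headers))
      (headers.map (fun h => min (max (PySem.Str.len h) 4) 80))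
  let hdrLine := pvFmtA headers colWidths headers "#"
  let sep := "|-" ++ PySem.Str.join "-|-"
      (((4 : Int) :: colWidths).map (fun w => String.ofList (PySem.List.pyRepeat ['-'] w))) ++ "-|"
  PySem.Str.join "\n" ([hdrLine, sep] ++
    (PySem.List.enumerate rows).map (fun ir => pvFmtA headers colWidths ir.2 (pvLabel (ir.1 + 1))))

-- ===== PORT B =====
-- glue(parts, fill) = "|" + fill + (fill + "|" + fill).join(parts) + fill + "|"
def pvGlue (parts : List String) (fill : String) : String :=
  "|" ++ fill ++ PySem.Str.join (fill ++ "|" ++ fill) parts ++ fill ++ "|"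

-- zip(*cols): truncating transpose, Python's zip over the unpacked columns
def pvZipN (cols : List (List String)) : List (List String) :=
  if h : cols = [] ∨ cols.any (fun c => c.isEmpty) then [] else
    (cols.map (fun c => c.headD "")) :: pvZipN (cols.map (fun c => c.drop 1))
termination_by (cols.headD []).length
decreasing_by
  obtain ⟨h1, h2⟩ := not_or.mp h
  cases cols with
  | nil => exact absurd rfl h1
  | cons c cs =>
    simp only [List.map_cons, List.headD_cons]
    have hc : c ≠ [] := by
      intro hce
      apply h2
      subst hce
      simp
    cases c with
    | nil => exact absurd rfl hc
    | cons a as => simp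

def pvLabelColB (rows : List (List String)) : List String :=
  "#" :: (List.range rows.length).map (fun (i : Nat) => pvLabel ((i : Int) + 1))

def pvDataCols (headers : List String) (rows : List (List String)) : List (List String) :=
  (PySem.List.enumerate headers).map (fun jh => jh.2 :: rows.map (fun r =>
    if jh.1 < PySem.List.len r then PySem.List.pyGetD r jh.1 "" else ""))

-- min(max(ROW_NUM_W, max(len(c) for c in col)), MAX_PAD_W)
def pvWidthFn (col : List String) : Int :=
  min (max 4 ((PySem.List.max? (col.map PySem.Str.len) (fun x => x)).getD 0)) 80

-- [col[0].ljust(w), "-" * w] + [c.ljust(w) for c in col[1:]]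
def pvPadCol (cw : List String × Int) : List String :=
  pvLjust (PySem.List.pyGetD cw.1 0 "") cw.2
    :: String.ofList (PySem.List.pyRepeat ['-'] cw.2)
    :: (PySem.List.slice cw.1 (some 1) none).map (fun c => pvLjust c cw.2)

def build_text_table_py_alt (headers : List String) (rows : List (List String)) : String :=
  let padded : List (List String) :=
    (List.zip (pvLabelColB rows :: pvDataCols headers rows)
      ((4 : Int) :: (pvDataCols headers rows).map pvWidthFn)).map pvPadCol
  PySem.Str.join "\n" ((PySem.List.enumerate (pvZipN padded)).map
    (fun kl => pvGlue kl.2 (if kl.1 == 1 then "-" else " ")))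

-- ===== PRECONDITION & SPEC =====
def Spec_build_text_table_py (headers : List String) (rows : List (List String)) (out : String) : Prop := out = build_text_table_py_alt headers rows
instance (headers : List String) (rows : List (List String)) (out : String) : Decidable (Spec_build_text_table_py headers rows out) := by unfold Spec_build_text_table_py; infer_instance

-- ===== CLAIM (what is proved, stated in full; the proofs are below) =====
def Claim_equal_build_text_table_py : Prop := ∀ (headers : List String) (rows : List (List String)), Dom_build_text_table_py headers rows → Spec_build_text_table_py headers rows (build_text_table_py headers rows)

-- ===== LEMMAS AND PROOFS =====

-- ---- A's width fold, pointwise (row-major fold → per-column fold) ----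

theorem pvStepCell_cons_succ (w : Int) (ws : List Int) (m : Nat) (c : String) :
    pvStepCell (w :: ws) (((m + 1 : Nat) : Int), c) = w :: pvStepCell ws (((m : Nat) : Int), c) := by
  unfold pvStepCell
  simp only [PySem.List.len_eq, List.length_cons, PySem.List.pyGetD_natCast,
    PySem.List.pySetD_natCast, List.getD_cons_succ, List.set_cons_succ]
  by_cases h : (m : Int) < ws.length
  · rw [if_pos (by push_cast; omega), if_pos (by exact_mod_cast h)]
  · rw [if_neg (by push_cast; omega), if_neg (by exact_mod_cast h)]

theorem pvFoldShift (cs : List String) : ∀ (m : Nat) (w : Int) (ws : List Int),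
    (PySem.List.enumerate cs ((m + 1 : Nat) : Int)).foldl pvStepCell (w :: ws)
      = w :: (PySem.List.enumerate cs ((m : Nat) : Int)).foldl pvStepCell ws := by
  induction cs with
  | nil => intro m w ws; simp [PySem.List.enumerate_nil]
  | cons c cs ih =>
    intro m w ws
    rw [PySem.List.enumerate_cons, PySem.List.enumerate_cons, List.foldl_cons, List.foldl_cons,
      pvStepCell_cons_succ]
    have h1 : ((m + 1 : Nat) : Int) + 1 = ((m + 2 : Nat) : Int) := by push_cast; ring
    have h2 : ((m : Nat) : Int) + 1 = ((m + 1 : Nat) : Int) := by push_cast; ring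
    rw [h1, h2]
    exact ih (m + 1) w (pvStepCell ws (((m : Nat) : Int), c))

theorem pvFoldCell_eq (cs : List String) : ∀ (ws : List Int), cs.length ≤ ws.length →
    (PySem.List.enumerate cs).foldl pvStepCell ws
      = List.zipWith (fun w c => min (max w (PySem.Str.len c)) 80) ws cs ++ ws.drop cs.length := by
  induction cs with
  | nil => intro ws _; simp [PySem.List.enumerate_nil]
  | cons c cs ih =>
    intro ws hle
    cases ws with
    | nil => simp at hle
    | cons w ws =>
      rw [PySem.List.enumerate_cons, List.foldl_cons]
      have hstep : pvStepCell (w :: ws) (0, c)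
          = (min (max w (PySem.Str.len c)) 80) :: ws := by
        unfold pvStepCell
        rw [if_pos (by simp)]
        have hz : (0 : Int) = ((0 : Nat) : Int) := rfl
        rw [hz, PySem.List.pySetD_natCast, PySem.List.pyGetD_natCast]
        simp
      rw [hstep]
      have h0 : (0 : Int) + 1 = ((0 + 1 : Nat) : Int) := by norm_num
      rw [h0, pvFoldShift cs 0 (min (max w (PySem.Str.len c)) 80) ws]
      simp only [Nat.cast_zero]
      rw [ih ws (by simpa using hle)]
      simp

theorem pvStepRow_getD (n : Nat) (ws : List Int) (row : List String) (hlen : ws.length = n)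
    (i : Nat) (hi : i < n) :
    (pvStepRow ((n : Nat) : Int) ws row).getD i 0
      = match row[i]? with
        | some c => min (max (ws.getD i 0) (PySem.Str.len c)) 80
        | none => ws.getD i 0 := by
  unfold pvStepRow
  rw [PySem.List.slice_to_natCast, pvFoldCell_eq _ ws (by simp [hlen])]
  have hzl : (List.zipWith (fun w c => min (max w (PySem.Str.len c)) 80) ws (row.take n)).length
      = min row.length n := by simp [hlen]; omega
  by_cases hi2 : i < min row.length n
  · have hr : row[i]? = some row[i] := List.getElem?_eq_getElem (by omega)
    rw [hr]
    rw [List.getD_eq_getElem?_getD, List.getElem?_append_left (by omega)]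
    rw [List.getElem?_zipWith]
    rw [List.getElem?_eq_getElem (l := ws) (by omega), List.getElem?_eq_getElem (l := row.take n) (by simp; omega)]
    simp [List.getD_eq_getElem?_getD, List.getElem?_eq_getElem (l := ws) (show i < ws.length by omega)]
  · have hr : row[i]? = none := List.getElem?_eq_none (by omega)
    rw [hr]
    rw [List.getD_eq_getElem?_getD, List.getElem?_append_right (by omega), hzl]
    rw [List.getElem?_drop]
    have : (List.take n row).length + (i - min row.length n) = i := by simp; omega
    rw [this, ← List.getD_eq_getElem?_getD]

theorem pvStepRow_length (n : Nat) (ws : List Int) (row : List String) (hlen : ws.length = n) :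
    (pvStepRow ((n : Nat) : Int) ws row).length = n := by
  unfold pvStepRow
  rw [PySem.List.slice_to_natCast, pvFoldCell_eq _ ws (by simp [hlen])]
  simp [hlen]

theorem pvOuter_length (rows : List (List String)) : ∀ (n : Nat) (ws : List Int), ws.length = n →
    (rows.foldl (pvStepRow ((n : Nat) : Int)) ws).length = n := by
  induction rows with
  | nil => intro n ws h; simpa using h
  | cons r rs ih =>
    intro n ws h
    rw [List.foldl_cons]
    exact ih n _ (pvStepRow_length n ws r h)

theorem pvOuter_getD (rows : List (List String)) : ∀ (n : Nat) (ws : List Int), ws.length = n →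
    ∀ i, i < n →
    (rows.foldl (pvStepRow ((n : Nat) : Int)) ws).getD i 0
      = (rows.filterMap (fun r => r[i]?)).foldl
          (fun m c => min (max m (PySem.Str.len c)) 80) (ws.getD i 0) := by
  induction rows with
  | nil => intro n ws _ i _; simp
  | cons r rs ih =>
    intro n ws h i hi
    rw [List.foldl_cons, List.filterMap_cons]
    have hrec := ih n (pvStepRow ((n : Nat) : Int) ws r) (pvStepRow_length n ws r h) i hi
    rw [hrec, pvStepRow_getD n ws r h i hi]
    cases hri : r[i]? with
    | some c => simp
    | none => simp

-- sequential capping at 80 equals one cap of the final max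
theorem pvCapFold (cs : List String) : ∀ (m : Int),
    cs.foldl (fun w c => min (max w (PySem.Str.len c)) 80) (min m 80)
      = min (cs.foldl (fun w c => max w (PySem.Str.len c)) m) 80 := by
  induction cs with
  | nil => intro m; simp
  | cons c cs ih =>
    intro m
    rw [List.foldl_cons, List.foldl_cons]
    have h1 : min (max (min m 80) (PySem.Str.len c)) 80 = min (max m (PySem.Str.len c)) 80 := by
      omega
    rw [h1, ih (max m (PySem.Str.len c))]

-- B's column max (over per-row picks, "" for a missing cell) equals A's fold over the existing cells
theorem pvColMax (j : Nat) (rows : List (List String)) : ∀ (b : Int),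
    max 4 ((rows.map (fun r =>
        PySem.Str.len (if (j : Int) < PySem.List.len r then PySem.List.pyGetD r (j : Int) "" else ""))).foldl max b)
      = (rows.filterMap (fun r => r[j]?)).foldl (fun m c => max m (PySem.Str.len c)) (max b 4) := by
  induction rows with
  | nil => intro b; rw [List.map_nil, List.filterMap_nil, List.foldl_nil, List.foldl_nil, max_comm]
  | cons r rs ih =>
    intro b
    rw [List.map_cons, List.foldl_cons, List.filterMap_cons]
    by_cases hj : j < r.length
    · have hr : r[j]? = some r[j] := List.getElem?_eq_getElem hj
      rw [hr]
      have hpick : (if (j : Int) < PySem.List.len r then PySem.List.pyGetD r (j : Int) "" else "") = r[j] := by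
        rw [if_pos (by rw [PySem.List.len_eq]; exact_mod_cast hj)]
        rw [PySem.List.pyGetD_natCast]
        exact List.getD_eq_getElem r "" hj
      rw [hpick, List.foldl_cons, ih (max b (PySem.Str.len r[j]))]
      have : max (max b (PySem.Str.len r[j])) 4 = max (max b 4) (PySem.Str.len r[j]) := by omega
      rw [this]
    · have hr : r[j]? = none := List.getElem?_eq_none (by omega)
      rw [hr]
      have hpick : (if (j : Int) < PySem.List.len r then PySem.List.pyGetD r (j : Int) "" else "") = "" := by
        rw [if_neg (by rw [PySem.List.len_eq]; push_cast; omega)]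
      rw [hpick, ih (max b (PySem.Str.len ""))]
      have h0 : PySem.Str.len "" = 0 := rfl
      rw [h0]
      have : max (max b 0) 4 = max b 4 := by omega
      rw [this]

-- the i-th entry of A's computed col_widths, in B's closed column form
theorem pvWidthsA_getD (headers : List String) (rows : List (List String)) (i : Nat)
    (hi : i < headers.length) :
    (rows.foldl (pvStepRow (PySem.List.len headers))
        (headers.map (fun h => min (max (PySem.Str.len h) 4) 80))).getD i 0
      = min (max 4 ((rows.map (fun r =>
            PySem.Str.len (if (i : Int) < PySem.List.len r then PySem.List.pyGetD r (i : Int) "" else ""))).foldl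
              max (PySem.Str.len headers[i]))) 80 := by
  have hinitlen : (headers.map (fun h => min (max (PySem.Str.len h) 4) 80)).length = headers.length := by
    simp
  rw [PySem.List.len_eq, pvOuter_getD rows headers.length _ hinitlen i hi]
  have hinit : (headers.map (fun h => min (max (PySem.Str.len h) 4) 80)).getD i 0
      = min (max (PySem.Str.len headers[i]) 4) 80 := by
    rw [List.getD_eq_getElem _ 0 (by simpa using hi), List.getElem_map]
  rw [hinit, pvCapFold, pvColMax]

-- lengths of A's width list
theorem pvWidthsA_length (headers : List String) (rows : List (List String)) :
    (rows.foldl (pvStepRow (PySem.List.len headers))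
        (headers.map (fun h => min (max (PySem.Str.len h) 4) 80))).length = headers.length := by
  rw [PySem.List.len_eq]
  exact pvOuter_length rows headers.length _ (by simp)

-- ---- the transpose ----

-- Python's zip(*cols) on columns of one common length m, row by row
theorem pvZipN_uniform (m : Nat) : ∀ (cols : List (List String)), cols ≠ [] →
    (∀ c ∈ cols, c.length = m) →
    pvZipN cols = (List.range m).map (fun k => cols.map (fun c => c.getD k "")) := by
  induction m with
  | zero =>
    intro cols hne hlen
    have hcond : cols = [] ∨ cols.any (fun c => c.isEmpty) := by
      right
      cases cols with
      | nil => exact absurd rfl hne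
      | cons c cs =>
        have hc := hlen c List.mem_cons_self
        simp only [List.any_cons, Bool.or_eq_true]
        left
        rw [List.isEmpty_iff]
        exact List.eq_nil_of_length_eq_zero hc
    rw [pvZipN, dif_pos hcond]
    simp
  | succ m ih =>
    intro cols hne hlen
    have hcond : ¬ (cols = [] ∨ cols.any (fun c => c.isEmpty) = true) := by
      rintro (h | h)
      · exact hne h
      · obtain ⟨c, hc, hemp⟩ := List.any_eq_true.mp h
        have hlc := hlen c hc
        rw [List.isEmpty_iff] at hemp
        rw [hemp] at hlc
        simp at hlc
    rw [pvZipN, dif_neg hcond]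
    have hmapne : cols.map (fun c => c.drop 1) ≠ [] := by simpa using hne
    have hmaplen : ∀ c ∈ cols.map (fun c => c.drop 1), c.length = m := by
      intro c hc
      rw [List.mem_map] at hc
      obtain ⟨d, hd, rfl⟩ := hc
      simp [hlen d hd]
    rw [ih _ hmapne hmaplen, List.range_succ_eq_map, List.map_cons, List.map_map]
    congr 1
    · apply List.map_congr_left
      intro c hc
      have hlc := hlen c hc
      cases c with
      | nil => simp at hlc
      | cons a as => rfl
    · apply List.map_congr_left
      intro k _
      simp only [Function.comp_apply]
      rw [List.map_map]
      apply List.map_congr_left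
      intro c _
      simp only [Function.comp_apply]
      rw [List.getD_eq_getElem?_getD, List.getD_eq_getElem?_getD, List.getElem?_drop,
        Nat.add_comm]

-- ---- the gluer vs A's literals ----

theorem pvGlue_space (p : List String) :
    pvGlue p " " = "| " ++ PySem.Str.join " | " p ++ " |" := by
  unfold pvGlue
  have h1 : (" " : String) ++ "|" ++ " " = " | " := rfl
  have h2 : ("|" : String) ++ " " = "| " := rfl
  rw [h1, h2, String.append_assoc]
  rfl

theorem pvGlue_dash (p : List String) :
    pvGlue p "-" = "|-" ++ PySem.Str.join "-|-" p ++ "-|" := by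
  unfold pvGlue
  have h1 : ("-" : String) ++ "|" ++ "-" = "-|-" := rfl
  have h2 : ("|" : String) ++ "-" = "|-" := rfl
  rw [h1, h2, String.append_assoc]
  rfl

-- A's fmt as a label plus a range-indexed part list
theorem pvFmtA_parts (headers : List String) (colWidths : List Int) (cells : List String) (lbl : String) :
    pvFmtA headers colWidths cells lbl
      = pvGlue (pvLjust lbl 4 :: (List.range headers.length).map (fun i =>
          pvLjust (if i < cells.length then cells.getD i "" else "") (colWidths.getD i 0))) " " := by
  unfold pvFmtA
  rw [pvGlue_space]
  dsimp only
  rw [PySem.List.foldl_append_singleton_eq_map, List.singleton_append]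
  have hmap : (PySem.List.enumerate headers).map
        (fun ih => pvLjust (if ih.1 < PySem.List.len cells then PySem.List.pyGetD cells ih.1 "" else "")
                      (PySem.List.pyGetD colWidths ih.1 0))
      = (List.range headers.length).map (fun i =>
          pvLjust (if i < cells.length then cells.getD i "" else "") (colWidths.getD i 0)) := by
    apply List.ext_getElem
    · simp [PySem.List.length_enumerate]
    · intro k h1 h2
      rw [List.getElem_map, List.getElem_map, List.getElem_range, PySem.List.getElem_enumerate]
      simp only [zero_add, PySem.List.len_eq, PySem.List.pyGetD_natCast, Nat.cast_lt]
  rw [hmap]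

-- ---- B's width list equals A's computed col_widths ----

theorem pvDataCols_length (headers : List String) (rows : List (List String)) :
    (pvDataCols headers rows).length = headers.length := by
  simp [pvDataCols, PySem.List.length_enumerate]

theorem pvDataCols_getElem (headers : List String) (rows : List (List String)) (j : Nat)
    (hj : j < headers.length) :
    (pvDataCols headers rows)[j]'(by rw [pvDataCols_length]; exact hj)
      = headers[j] :: rows.map (fun r =>
          if (j : Int) < PySem.List.len r then PySem.List.pyGetD r (j : Int) "" else "") := by
  unfold pvDataCols
  rw [List.getElem_map, PySem.List.getElem_enumerate]
  simp

theorem pvWtail_eq (headers : List String) (rows : List (List String)) :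
    (pvDataCols headers rows).map pvWidthFn
      = rows.foldl (pvStepRow (PySem.List.len headers))
          (headers.map (fun h => min (max (PySem.Str.len h) 4) 80)) := by
  apply List.ext_getElem
  · rw [List.length_map, pvDataCols_length, pvWidthsA_length]
  · intro j h1 h2
    have hj : j < headers.length := by
      rwa [List.length_map, pvDataCols_length] at h1
    rw [List.getElem_map, pvDataCols_getElem headers rows j hj]
    rw [← List.getD_eq_getElem _ 0 h2, pvWidthsA_getD headers rows j hj]
    unfold pvWidthFn
    rw [List.map_cons, PySem.List.max?_id_cons, Option.getD_some, List.map_map]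
    rfl

-- ---- the assembled line lists coincide ----

theorem pvPadCol_length (a : String) (as : List String) (w : Int) :
    (pvPadCol (a :: as, w)).length = as.length + 2 := by
  unfold pvPadCol
  rw [PySem.List.slice_from_one]
  simp

theorem pvPad_getD0 (c : List String) (w : Int) :
    (pvPadCol (c, w)).getD 0 "" = pvLjust (PySem.List.pyGetD c 0 "") w := rfl

theorem pvPad_getD1 (c : List String) (w : Int) :
    (pvPadCol (c, w)).getD 1 "" = String.ofList (PySem.List.pyRepeat ['-'] w) := rfl

theorem pvPad_getD2 (c : List String) (w : Int) (k : Nat) :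
    (pvPadCol (c, w)).getD (k + 2) ""
      = ((PySem.List.slice c (some 1) none).map (fun x => pvLjust x w)).getD k "" := rfl

theorem pvGetD0_cons (a : String) (l : List String) :
    PySem.List.pyGetD (a :: l) 0 "" = a := by
  have h : (0 : Int) = ((0 : Nat) : Int) := rfl
  rw [h, PySem.List.pyGetD_natCast]
  rfl

set_option maxHeartbeats 1000000 in
theorem pvLines_eq (headers : List String) (rows : List (List String)) (cw : List Int)
    (hcw : cw.length = headers.length) :
    (PySem.List.enumerate (pvZipN ((List.zip (pvLabelColB rows :: pvDataCols headers rows)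
        ((4 : Int) :: cw)).map pvPadCol))).map
      (fun kl => pvGlue kl.2 (if kl.1 == 1 then "-" else " "))
      = pvFmtA headers cw headers "#"
        :: ("|-" ++ PySem.Str.join "-|-"
              (((4 : Int) :: cw).map (fun w => String.ofList (PySem.List.pyRepeat ['-'] w))) ++ "-|")
        :: (PySem.List.enumerate rows).map (fun ir => pvFmtA headers cw ir.2 (pvLabel (ir.1 + 1))) := by
  have hdcl := pvDataCols_length headers rows
  have hziplen : (List.zip (pvLabelColB rows :: pvDataCols headers rows) ((4 : Int) :: cw)).length
      = headers.length + 1 := by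
    rw [List.length_zip]
    simp [hdcl, hcw]
  have hpadlen : ((List.zip (pvLabelColB rows :: pvDataCols headers rows)
      ((4 : Int) :: cw)).map pvPadCol).length = headers.length + 1 := by
    rw [List.length_map, hziplen]
  -- every padded column has length rows.length + 2
  have huni : ∀ c ∈ (List.zip (pvLabelColB rows :: pvDataCols headers rows)
      ((4 : Int) :: cw)).map pvPadCol, c.length = rows.length + 2 := by
    intro c hc
    rw [List.mem_map] at hc
    obtain ⟨p, hp, rfl⟩ := hc
    have hp1 := (List.of_mem_zip hp).1
    have hlc : p.1.length = rows.length + 1 := by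
      rcases List.mem_cons.mp hp1 with h | h
      · rw [h]; simp [pvLabelColB]
      · rw [pvDataCols, List.mem_map] at h
        obtain ⟨jh, _, heq⟩ := h
        rw [← heq]
        simp
    obtain ⟨c1, w1⟩ := p
    cases c1 with
    | nil => simp at hlc
    | cons a as =>
      rw [pvPadCol_length]
      simp only [] at hlc
      simp at hlc
      omega
  have hpadne : (List.zip (pvLabelColB rows :: pvDataCols headers rows)
      ((4 : Int) :: cw)).map pvPadCol ≠ [] := by
    intro h
    rw [h] at hpadlen
    simp at hpadlen
  rw [pvZipN_uniform (rows.length + 2) _ hpadne huni]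
  -- indexed access into the padded column list
  have hpadget : ∀ (j : Nat) (hj1 : j < headers.length + 1),
      ((List.zip (pvLabelColB rows :: pvDataCols headers rows)
        ((4 : Int) :: cw)).map pvPadCol)[j]'(by rw [hpadlen]; exact hj1)
      = pvPadCol ((pvLabelColB rows :: pvDataCols headers rows)[j]'(by simp [hdcl]; omega),
                  ((4 : Int) :: cw)[j]'(by simp [hcw]; omega)) := by
    intro j hj1
    rw [List.getElem_map, List.getElem_zip]
  apply List.ext_getElem
  · simp [PySem.List.length_enumerate]
  · intro k hk1 hk2
    rw [List.getElem_map, PySem.List.getElem_enumerate, List.getElem_map, List.getElem_range]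
    cases k with
    | zero =>
      -- header line
      rw [List.getElem_cons_zero]
      rw [if_neg (by simp)]
      rw [pvFmtA_parts]
      congr 1
      apply List.ext_getElem
      · rw [List.length_map, hpadlen]
        simp
      · intro j hj1 hj2
        have hjb : j < headers.length + 1 := by rwa [List.length_map, hpadlen] at hj1
        rw [List.getElem_map, hpadget j hjb]
        cases j with
        | zero =>
          rw [List.getElem_cons_zero, List.getElem_cons_zero, List.getElem_cons_zero,
            pvPad_getD0]
          unfold pvLabelColB
          rw [pvGetD0_cons]
        | succ j =>
          have hj : j < headers.length := by omega
          rw [List.getElem_cons_succ, List.getElem_cons_succ, List.getElem_cons_succ,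
            List.getElem_map, List.getElem_range, pvDataCols_getElem headers rows j hj,
            pvPad_getD0, pvGetD0_cons]
          rw [if_pos hj, List.getD_eq_getElem _ "" hj,
            List.getD_eq_getElem _ 0 (by omega : j < cw.length)]
    | succ k =>
      cases k with
      | zero =>
        -- separator line
        rw [List.getElem_cons_succ, List.getElem_cons_zero]
        rw [if_pos (by simp)]
        rw [pvGlue_dash]
        congr 2
        dsimp only
        congr 1
        apply List.ext_getElem
        · rw [List.length_map, hpadlen]
          simp [hcw]
        · intro j hj1 hj2
          have hjb : j < headers.length + 1 := by rwa [List.length_map, hpadlen] at hj1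
          rw [List.getElem_map, hpadget j hjb, List.getElem_map, pvPad_getD1]
      | succ k =>
        -- data line k
        have hkr : k < rows.length := by
          have := hk2
          simp at this
          omega
        rw [List.getElem_cons_succ, List.getElem_cons_succ, List.getElem_map,
          PySem.List.getElem_enumerate]
        rw [if_neg (by simp only [beq_iff_eq]; push_cast; omega)]
        rw [pvFmtA_parts]
        congr 1
        apply List.ext_getElem
        · rw [List.length_map, hpadlen]
          simp
        · intro j hj1 hj2
          have hjb : j < headers.length + 1 := by rwa [List.length_map, hpadlen] at hj1
          rw [List.getElem_map, hpadget j hjb]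
          cases j with
          | zero =>
            rw [List.getElem_cons_zero, List.getElem_cons_zero, List.getElem_cons_zero,
              pvPad_getD2]
            unfold pvLabelColB
            rw [PySem.List.slice_from_one, List.tail_cons, List.map_map]
            rw [List.getD_eq_getElem _ "" (by simpa using hkr), List.getElem_map,
              List.getElem_range]
            simp
          | succ j =>
            have hj : j < headers.length := by omega
            rw [List.getElem_cons_succ, List.getElem_cons_succ, List.getElem_cons_succ,
              List.getElem_map, List.getElem_range, pvDataCols_getElem headers rows j hj,
              pvPad_getD2]
            rw [PySem.List.slice_from_one, List.tail_cons, List.map_map]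
            rw [List.getD_eq_getElem _ "" (by simpa using hkr), List.getElem_map]
            simp only [Function.comp_apply]
            rw [List.getD_eq_getElem _ 0 (by omega : j < cw.length)]
            congr 1
            by_cases hc : j < rows[k].length
            · rw [if_pos (by rw [PySem.List.len_eq]; exact_mod_cast hc), if_pos hc,
                PySem.List.pyGetD_natCast]
            · rw [if_neg (by rw [PySem.List.len_eq]; push_cast; omega), if_neg hc]

-- ===== VERDICT (by name: the statement is the Claim_ definition above) =====
theorem build_text_table_py_spec : Claim_equal_build_text_table_py := by
  intro headers rows _
  unfold Spec_build_text_table_py build_text_table_py build_text_table_py_alt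
  simp only [pvWtail_eq headers rows,
    pvLines_eq headers rows
      (rows.foldl (pvStepRow (PySem.List.len headers))
        (headers.map (fun h => min (max (PySem.Str.len h) 4) 80)))
      (pvWidthsA_length headers rows)]
  rfl
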